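-- pv_equiv track=rewrite | github.com/Pallavi0804/Data-Structure-Algorithm | Bit Manipulation/Largest_Subarray_XOR_Zero.py | largest_subarray_length
-- ===== SOURCE A (Python) =====
-- def largest_subarray_length(array):
--     length = 0
--     xor_output = 0
--     hash = {}
--     for i in range(len(array)):
--         xor_output = xor_output ^ array[i]
--         if xor_output == 0:
--             if length < i+1: length = i+1
--             continue
--         if xor_output not in hash:
--             hash[xor_output] = i
--         else:
--             pre_index = hash[xor_output]
--             subarray_len = i - pre_index
--             if length < subarray_len:
--                 length = subarray_len
--
--     return length
-- ===== SOURCE B (Python) =====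
-- def largest_subarray_length(array):
--     best = 0
--     n = len(array)
--     for i in range(n):
--         acc = 0
--         for j in range(i, n):
--             acc ^= array[j]
--             if acc == 0 and best < j - i + 1:
--                 best = j - i + 1
--     return best
-- ===== Notes on version B (the rewrite author's own statement) =====
-- stated objective: alternative
-- what changed: Replaces the single-pass prefix-XOR hashmap (first-occurrence index table) with a naive double loop that re-scans every start index with a running XOR and no auxiliary table, trading speed for constant space and no hashing.
import Mathlib
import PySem

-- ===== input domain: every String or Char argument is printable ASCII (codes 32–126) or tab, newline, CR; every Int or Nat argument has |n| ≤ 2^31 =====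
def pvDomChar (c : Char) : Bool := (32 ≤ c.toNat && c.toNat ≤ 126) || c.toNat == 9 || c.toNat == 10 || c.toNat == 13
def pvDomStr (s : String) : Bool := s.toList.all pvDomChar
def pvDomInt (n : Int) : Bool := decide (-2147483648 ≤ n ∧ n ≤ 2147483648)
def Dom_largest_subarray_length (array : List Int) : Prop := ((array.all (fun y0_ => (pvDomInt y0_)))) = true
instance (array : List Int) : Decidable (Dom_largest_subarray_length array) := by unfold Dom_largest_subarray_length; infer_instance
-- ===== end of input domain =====

-- B replaces A's single-pass prefix-XOR hashmap with a naive double loop (running XOR per start index,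
-- no auxiliary table): an alternative algorithm, not faster.

-- ===== PORT A =====
-- one loop step of A: xor in array[i]; zero-prefix case, first-occurrence insert, or length update
def pvStepA (array : List Int) (st : Int × Int × PySem.Dict Int Int) (i : Int) :
    Int × Int × PySem.Dict Int Int :=
  let xor_output := PySem.Int.bxor st.2.1 (PySem.List.pyGetD array i 0)
  if xor_output = 0 then
    (if st.1 < i + 1 then i + 1 else st.1, xor_output, st.2.2)
  else if st.2.2.contains xor_output = false then
    (st.1, xor_output, st.2.2.insert xor_output i)
  else
    -- pre_index = hash[xor_output]; key is present in this branch, so getD is exact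
    let pre_index := st.2.2.getD xor_output 0
    let subarray_len := i - pre_index
    (if st.1 < subarray_len then subarray_len else st.1, xor_output, st.2.2)

def largest_subarray_length (array : List Int) : Int :=
  ((PySem.List.pyRange 0 (PySem.List.len array) 1).foldl (pvStepA array)
    (0, 0, (PySem.Dict.empty : PySem.Dict Int Int))).1

-- ===== PORT B =====
-- inner-loop step of B at start index i: acc ^= array[j]; update best on a zero window
def pvInnerB (array : List Int) (i : Int) (st : Int × Int) (j : Int) : Int × Int :=
  let acc := PySem.Int.bxor st.2 (PySem.List.pyGetD array j 0)
  (if acc = 0 ∧ st.1 < j - i + 1 then j - i + 1 else st.1, acc)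

-- the body of B's outer loop: scan all windows starting at i with a fresh running XOR
def pvOuter (array : List Int) (best i : Int) : Int :=
  ((PySem.List.pyRange i (PySem.List.len array) 1).foldl (pvInnerB array i) (best, 0)).1

def largest_subarray_length_alt (array : List Int) : Int :=
  (PySem.List.pyRange 0 (PySem.List.len array) 1).foldl (pvOuter array) 0

-- ===== PRECONDITION & SPEC =====
def Spec_largest_subarray_length (array : List Int) (out : Int) : Prop := out = largest_subarray_length_alt array
instance (array : List Int) (out : Int) : Decidable (Spec_largest_subarray_length array out) := by unfold Spec_largest_subarray_length; infer_instance

-- ===== CLAIM (what is proved, stated in full; the proofs are below) =====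
def Claim_equal_largest_subarray_length : Prop := ∀ (array : List Int), Dom_largest_subarray_length array → Spec_largest_subarray_length array (largest_subarray_length array)

-- ===== LEMMAS AND PROOFS =====

-- ---- XOR group facts (PySem.Int.bxor is associative; only comm/self/zero are in the prelude) ----
lemma pv_bxor_ofNat_ofNat (m n : Nat) :
    PySem.Int.bxor (Int.ofNat m) (Int.ofNat n) = Int.ofNat (m ^^^ n) := by
  simp

lemma pv_bxor_ofNat_negSucc (m n : Nat) :
    PySem.Int.bxor (Int.ofNat m) (Int.negSucc n) = Int.negSucc (m ^^^ n) := by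
  simp only [Int.negSucc_eq, Int.ofNat_eq_natCast, PySem.Int.bxor]
  rw [if_pos (Int.natCast_nonneg m), if_neg (by omega)]
  have e1 : (-(-((n:Int) + 1)) - 1) = (n : Int) := by ring
  rw [e1]
  simp
  ring

lemma pv_bxor_negSucc_ofNat (m n : Nat) :
    PySem.Int.bxor (Int.negSucc m) (Int.ofNat n) = Int.negSucc (m ^^^ n) := by
  simp only [Int.negSucc_eq, Int.ofNat_eq_natCast, PySem.Int.bxor]
  rw [if_neg (by omega), if_pos (Int.natCast_nonneg n)]
  have e1 : (-(-((m:Int) + 1)) - 1) = (m : Int) := by ring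
  rw [e1]
  simp
  ring

lemma pv_bxor_negSucc_negSucc (m n : Nat) :
    PySem.Int.bxor (Int.negSucc m) (Int.negSucc n) = Int.ofNat (m ^^^ n) := by
  simp only [Int.negSucc_eq, Int.ofNat_eq_natCast, PySem.Int.bxor]
  rw [if_neg (by omega), if_neg (by omega)]
  have e1 : (-(-((m:Int) + 1)) - 1) = (m : Int) := by ring
  have e2 : (-(-((n:Int) + 1)) - 1) = (n : Int) := by ring
  rw [e1, e2]
  simp

lemma pv_bxor_assoc (a b c : Int) :
    PySem.Int.bxor (PySem.Int.bxor a b) c = PySem.Int.bxor a (PySem.Int.bxor b c) := by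
  cases a with
  | ofNat m =>
    cases b with
    | ofNat n =>
      cases c with
      | ofNat k => rw [pv_bxor_ofNat_ofNat, pv_bxor_ofNat_ofNat, pv_bxor_ofNat_ofNat,
          pv_bxor_ofNat_ofNat, Nat.xor_assoc]
      | negSucc k => rw [pv_bxor_ofNat_ofNat, pv_bxor_ofNat_negSucc, pv_bxor_ofNat_negSucc,
          pv_bxor_ofNat_negSucc, Nat.xor_assoc]
    | negSucc n =>
      cases c with
      | ofNat k => rw [pv_bxor_ofNat_negSucc, pv_bxor_negSucc_ofNat, pv_bxor_negSucc_ofNat,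
          pv_bxor_ofNat_negSucc, Nat.xor_assoc]
      | negSucc k => rw [pv_bxor_ofNat_negSucc, pv_bxor_negSucc_negSucc, pv_bxor_negSucc_negSucc,
          pv_bxor_ofNat_ofNat, Nat.xor_assoc]
  | negSucc m =>
    cases b with
    | ofNat n =>
      cases c with
      | ofNat k => rw [pv_bxor_negSucc_ofNat, pv_bxor_negSucc_ofNat, pv_bxor_ofNat_ofNat,
          pv_bxor_negSucc_ofNat, Nat.xor_assoc]
      | negSucc k => rw [pv_bxor_negSucc_ofNat, pv_bxor_negSucc_negSucc, pv_bxor_ofNat_negSucc,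
          pv_bxor_negSucc_negSucc, Nat.xor_assoc]
    | negSucc n =>
      cases c with
      | ofNat k => rw [pv_bxor_negSucc_negSucc, pv_bxor_ofNat_ofNat, pv_bxor_negSucc_ofNat,
          pv_bxor_negSucc_negSucc, Nat.xor_assoc]
      | negSucc k => rw [pv_bxor_negSucc_negSucc, pv_bxor_ofNat_negSucc, pv_bxor_negSucc_negSucc,
          pv_bxor_negSucc_ofNat, Nat.xor_assoc]

lemma pv_zero_bxor (a : Int) : PySem.Int.bxor 0 a = a := by
  rw [PySem.Int.bxor_comm, PySem.Int.bxor_zero]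

lemma pv_bxor_cancel (a b : Int) : PySem.Int.bxor a (PySem.Int.bxor a b) = b := by
  rw [← pv_bxor_assoc, PySem.Int.bxor_self, pv_zero_bxor]

lemma pv_bxor_eq_self_iff (a b : Int) : PySem.Int.bxor a b = a ↔ b = 0 := by
  constructor
  · intro h
    have : PySem.Int.bxor a (PySem.Int.bxor a b) = PySem.Int.bxor a a := by rw [h]
    rwa [pv_bxor_cancel, PySem.Int.bxor_self] at this
  · intro h; rw [h, PySem.Int.bxor_zero]

-- ---- prefix XOR and the common specification ----
def pvPfx (a : List Int) (k : Nat) : Int := (a.take k).foldl PySem.Int.bxor 0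

lemma pvPfx_zero (a : List Int) : pvPfx a 0 = 0 := rfl

lemma pvPfx_succ (a : List Int) (m : Nat) (h : m < a.length) :
    pvPfx a (m + 1) = PySem.Int.bxor (pvPfx a m) a[m] := by
  unfold pvPfx
  rw [List.take_succ, List.getElem?_eq_getElem h, Option.toList_some, List.foldl_append,
    List.foldl_cons, List.foldl_nil]

-- upper bound: r dominates every zero-XOR window (= equal prefix pair) ending at or before m
def pvUB (a : List Int) (m : Nat) (r : Int) : Prop :=
  ∀ k j : Nat, k < j → j ≤ m → pvPfx a k = pvPfx a j → (j : Int) - (k : Int) ≤ r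

-- achievability: r is 0 or the length of some zero-XOR window ending at or before m
def pvAch (a : List Int) (m : Nat) (r : Int) : Prop :=
  r = 0 ∨ ∃ k j : Nat, k < j ∧ j ≤ m ∧ pvPfx a k = pvPfx a j ∧ r = (j : Int) - (k : Int)

def pvGood (a : List Int) (r : Int) : Prop := 0 ≤ r ∧ pvUB a a.length r ∧ pvAch a a.length r

lemma pvGood_le (a : List Int) (r₁ r₂ : Int) (h₁ : pvGood a r₁) (h₂ : pvGood a r₂) : r₁ ≤ r₂ := by
  obtain ⟨-, -, hach⟩ := h₁
  obtain ⟨hnn, hub, -⟩ := h₂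
  rcases hach with rfl | ⟨k, j, hkj, hj, heq, rfl⟩
  · exact hnn
  · exact hub k j hkj hj heq

lemma pvGood_unique (a : List Int) (r₁ r₂ : Int) (h₁ : pvGood a r₁) (h₂ : pvGood a r₂) :
    r₁ = r₂ :=
  le_antisymm (pvGood_le a r₁ r₂ h₁ h₂) (pvGood_le a r₂ r₁ h₂ h₁)

-- ---- A-side: partial fold and invariant ----
def pvFA (a : List Int) (m : Nat) : Int × Int × PySem.Dict Int Int :=
  (PySem.List.pyRange 0 (m : Int) 1).foldl (pvStepA a) (0, 0, (PySem.Dict.empty : PySem.Dict Int Int))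

lemma pvFA_succ (a : List Int) (m : Nat) : pvFA a (m + 1) = pvStepA a (pvFA a m) (m : Int) := by
  unfold pvFA
  rw [show ((m + 1 : Nat) : Int) = (m : Int) + 1 by push_cast; ring,
    PySem.List.pyRange_one_succ_right (Int.natCast_nonneg m), List.foldl_append]
  rfl

lemma pvA_eq_FA (a : List Int) : largest_subarray_length a = (pvFA a a.length).1 := by
  unfold largest_subarray_length pvFA
  rw [PySem.List.len_eq]

-- hash invariant: hash maps v ≠ 0 to (first k ≥ 1 with prefix-XOR v) − 1, defined iff v occurs
def pvHInv (a : List Int) (m : Nat) (h : PySem.Dict Int Int) : Prop :=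
  ∀ v : Int, v ≠ 0 →
    (h.get? v = none ∧ ∀ k : Nat, 1 ≤ k → k ≤ m → pvPfx a k ≠ v) ∨
    (∃ k : Nat, 1 ≤ k ∧ k ≤ m ∧ pvPfx a k = v ∧ (∀ k' : Nat, k' < k → pvPfx a k' ≠ v) ∧
      h.get? v = some ((k : Int) - 1))

def pvInvA (a : List Int) (m : Nat) (st : Int × Int × PySem.Dict Int Int) : Prop :=
  st.2.1 = pvPfx a m ∧ 0 ≤ st.1 ∧ pvUB a m st.1 ∧ pvAch a m st.1 ∧ pvHInv a m st.2.2

lemma pvInvA_zero (a : List Int) : pvInvA a 0 (pvFA a 0) := by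
  unfold pvFA
  rw [show ((0 : Nat) : Int) = 0 by rfl, PySem.List.pyRange_one_eq_nil le_rfl]
  refine ⟨rfl, le_rfl, ?_, Or.inl rfl, ?_⟩
  · intro k j hkj hj _; omega
  · intro v hv
    exact Or.inl ⟨PySem.Dict.get?_empty v, by intro k h1 h2 _; omega⟩

lemma pvInvA_step (a : List Int) (m : Nat) (hm : m < a.length)
    (st : Int × Int × PySem.Dict Int Int) (hinv : pvInvA a m st) :
    pvInvA a (m + 1) (pvStepA a st (m : Int)) := by
  obtain ⟨hx, hnn, hub, hach, hh⟩ := hinv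
  have hget : PySem.List.pyGetD a (m : Int) 0 = a[m] := by
    rw [PySem.List.pyGetD_natCast]; exact List.getD_eq_getElem a 0 hm
  have hxor : PySem.Int.bxor st.2.1 (PySem.List.pyGetD a (m : Int) 0) = pvPfx a (m + 1) := by
    rw [hget, hx, ← pvPfx_succ a m hm]
  unfold pvStepA
  rw [hxor]
  by_cases h0 : pvPfx a (m + 1) = 0
  · rw [if_pos h0]
    have hmax : st.1 ≤ (if st.1 < (m : Int) + 1 then (m : Int) + 1 else st.1) ∧
        (m : Int) + 1 ≤ (if st.1 < (m : Int) + 1 then (m : Int) + 1 else st.1) := by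
      split_ifs with h <;> omega
    refine ⟨h0.symm ▸ rfl, by omega, ?_, ?_, ?_⟩
    · -- upper bound
      intro k j hkj hj heq
      rcases Nat.lt_or_ge j (m + 1) with hj' | hj'
      · exact le_trans (hub k j hkj (by omega) heq) hmax.1
      · have hj2 : j = m + 1 := by omega
        have hle2 : (j : Int) - (k : Int) ≤ (m : Int) + 1 := by omega
        exact le_trans hle2 hmax.2
    · -- achievability
      by_cases hlt : st.1 < (m : Int) + 1
      · rw [if_pos hlt]
        exact Or.inr ⟨0, m + 1, by omega, le_rfl, by rw [pvPfx_zero, h0], by push_cast; ring⟩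
      · rw [if_neg hlt]
        rcases hach with h | ⟨k, j, hkj, hj, heq, hv⟩
        · exact Or.inl h
        · exact Or.inr ⟨k, j, hkj, by omega, heq, hv⟩
    · -- hash unchanged
      intro v hv
      rcases hh v hv with ⟨hn, hnone⟩ | ⟨k, h1, h2, h3, h4, h5⟩
      · refine Or.inl ⟨hn, ?_⟩
        intro k h1 h2
        rcases Nat.lt_or_ge k (m + 1) with h | h
        · exact hnone k h1 (by omega)
        · have : k = m + 1 := by omega
          subst this; rw [h0]; exact fun e => hv e.symm
      · exact Or.inr ⟨k, h1, by omega, h3, h4, h5⟩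
  · rw [if_neg h0]
    rcases hh (pvPfx a (m + 1)) h0 with ⟨hn, hnone⟩ | ⟨k₀, h1, h2, h3, h4, h5⟩
    · -- first occurrence: insert
      have hc : st.2.2.contains (pvPfx a (m + 1)) = false := by
        rw [PySem.Dict.contains_eq_isSome_get?, hn]; rfl
      rw [if_pos (by rw [hc])]
      have hnofirst : ∀ k : Nat, k < m + 1 → pvPfx a k ≠ pvPfx a (m + 1) := by
        intro k hk
        rcases Nat.eq_zero_or_pos k with rfl | hkpos
        · rw [pvPfx_zero]; exact fun e => h0 e.symm
        · exact hnone k hkpos (by omega)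
      refine ⟨rfl, hnn, ?_, ?_, ?_⟩
      · intro k j hkj hj heq
        rcases Nat.lt_or_ge j (m + 1) with hj' | hj'
        · exact hub k j hkj (by omega) heq
        · have : j = m + 1 := by omega
          subst this
          exact absurd heq (hnofirst k hkj)
      · rcases hach with h | ⟨k, j, hkj, hj, heq, hv⟩
        · exact Or.inl h
        · exact Or.inr ⟨k, j, hkj, by omega, heq, hv⟩
      · intro v hv
        by_cases hvx : v = pvPfx a (m + 1)
        · subst hvx
          refine Or.inr ⟨m + 1, by omega, le_rfl, rfl, hnofirst, ?_⟩
          rw [PySem.Dict.get?_insert_self]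
          congr 1; push_cast; ring
        · rcases hh v hv with ⟨hn', hnone'⟩ | ⟨k, h1, h2, h3, h4, h5⟩
          · refine Or.inl ⟨?_, ?_⟩
            · rw [PySem.Dict.get?_insert_of_ne _ _ hvx, hn']
            · intro k hk1 hk2
              rcases Nat.lt_or_ge k (m + 1) with h | h
              · exact hnone' k hk1 (by omega)
              · have : k = m + 1 := by omega
                subst this; exact fun e => hvx e.symm
          · exact Or.inr ⟨k, h1, by omega, h3, h4,
              by rw [PySem.Dict.get?_insert_of_ne _ _ hvx]; exact h5⟩
    · -- repeated value: update length with i - hash[x]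
      have hc : st.2.2.contains (pvPfx a (m + 1)) = true := by
        rw [PySem.Dict.contains_eq_isSome_get?, h5]; rfl
      rw [if_neg (by rw [hc]; simp)]
      have hgd : st.2.2.getD (pvPfx a (m + 1)) 0 = (k₀ : Int) - 1 := by
        rw [PySem.Dict.getD_eq_get?_getD, h5]; rfl
      rw [hgd]
      show pvInvA a (m + 1)
        (if st.1 < (m : Int) - ((k₀ : Int) - 1) then (m : Int) - ((k₀ : Int) - 1) else st.1,
          pvPfx a (m + 1), st.2.2)
      have hlen : (m : Int) - ((k₀ : Int) - 1) = ((m + 1 : Nat) : Int) - (k₀ : Int) := by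
        push_cast; ring
      have hmax : st.1 ≤ (if st.1 < (m : Int) - ((k₀ : Int) - 1) then (m : Int) - ((k₀ : Int) - 1) else st.1) ∧
          (m : Int) - ((k₀ : Int) - 1) ≤ (if st.1 < (m : Int) - ((k₀ : Int) - 1) then (m : Int) - ((k₀ : Int) - 1) else st.1) := by
        split_ifs with h <;> omega
      refine ⟨rfl, by omega, ?_, ?_, ?_⟩
      · intro k j hkj hj heq
        rcases Nat.lt_or_ge j (m + 1) with hj' | hj'
        · exact le_trans (hub k j hkj (by omega) heq) hmax.1
        · have : j = m + 1 := by omega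
          subst this
          have hk0 : 1 ≤ k := by
            rcases Nat.eq_zero_or_pos k with rfl | h
            · rw [pvPfx_zero] at heq; exact absurd heq.symm h0
            · exact h
          have hkk : k₀ ≤ k := by
            by_contra hlt
            exact h4 k (by omega) heq
          refine le_trans ?_ hmax.2
          push_cast; omega
      · by_cases hlt : st.1 < (m : Int) - ((k₀ : Int) - 1)
        · rw [if_pos hlt]
          exact Or.inr ⟨k₀, m + 1, by omega, le_rfl, h3, by push_cast; ring⟩
        · rw [if_neg hlt]
          rcases hach with h | ⟨k, j, hkj, hj, heq, hv⟩
          · exact Or.inl h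
          · exact Or.inr ⟨k, j, hkj, by omega, heq, hv⟩
      · intro v hv
        by_cases hvx : v = pvPfx a (m + 1)
        · subst hvx
          exact Or.inr ⟨k₀, h1, by omega, h3, h4, h5⟩
        · rcases hh v hv with ⟨hn', hnone'⟩ | ⟨k, hk1, hk2, hk3, hk4, hk5⟩
          · refine Or.inl ⟨hn', ?_⟩
            intro k hka hkb
            rcases Nat.lt_or_ge k (m + 1) with h | h
            · exact hnone' k hka (by omega)
            · have : k = m + 1 := by omega
              subst this; exact fun e => hvx e.symm
          · exact Or.inr ⟨k, hk1, by omega, hk3, hk4, hk5⟩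

lemma pvFA_inv (a : List Int) (m : Nat) (hm : m ≤ a.length) : pvInvA a m (pvFA a m) := by
  induction m with
  | zero => exact pvInvA_zero a
  | succ n ih =>
    rw [pvFA_succ]
    exact pvInvA_step a n (by omega) _ (ih (by omega))

lemma pvA_good (a : List Int) : pvGood a (largest_subarray_length a) := by
  rw [pvA_eq_FA]
  obtain ⟨-, hnn, hub, hach, -⟩ := pvFA_inv a a.length le_rfl
  exact ⟨hnn, hub, hach⟩

-- ---- B-side: inner-loop and outer-loop invariants ----
-- achievability for the inner loop: best is still the incoming best0, or a window starting at i
def pvAchI (a : List Int) (i : Nat) (best0 : Int) (t : Nat) (b : Int) : Prop :=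
  b = best0 ∨ ∃ j : Nat, i < j ∧ j ≤ t ∧ pvPfx a i = pvPfx a j ∧ b = (j : Int) - (i : Int)

lemma pvInner_spec (a : List Int) (i : Nat) (best0 : Int) :
    ∀ d t : Nat, ∀ b acc : Int, a.length - t = d → i ≤ t → t ≤ a.length →
    pvPfx a t = PySem.Int.bxor (pvPfx a i) acc →
    best0 ≤ b → 0 ≤ b →
    (∀ j : Nat, i < j → j ≤ t → pvPfx a i = pvPfx a j → (j : Int) - (i : Int) ≤ b) →
    pvAchI a i best0 t b →
    (best0 ≤ ((PySem.List.pyRange (t : Int) (PySem.List.len a) 1).foldl (pvInnerB a i) (b, acc)).1 ∧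
     0 ≤ ((PySem.List.pyRange (t : Int) (PySem.List.len a) 1).foldl (pvInnerB a i) (b, acc)).1 ∧
     (∀ j : Nat, i < j → j ≤ a.length → pvPfx a i = pvPfx a j →
        (j : Int) - (i : Int) ≤ ((PySem.List.pyRange (t : Int) (PySem.List.len a) 1).foldl (pvInnerB a i) (b, acc)).1) ∧
     pvAchI a i best0 a.length
       ((PySem.List.pyRange (t : Int) (PySem.List.len a) 1).foldl (pvInnerB a i) (b, acc)).1) := by
  intro d
  induction d with
  | zero =>
    intro t b acc hd hit hta hacc hb0 hbnn hubb hachb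
    have ht : t = a.length := by omega
    subst ht
    rw [PySem.List.len_eq, PySem.List.pyRange_one_eq_nil le_rfl]
    exact ⟨hb0, hbnn, hubb, hachb⟩
  | succ d ih =>
    intro t b acc hd hit hta hacc hb0 hbnn hubb hachb
    have ht : t < a.length := by omega
    have hc1 : a.length - (t + 1) = d := by omega
    have hc2 : i ≤ t + 1 := by omega
    have hc3 : t + 1 ≤ a.length := by omega
    rw [PySem.List.len_eq, PySem.List.pyRange_one_cons (by exact_mod_cast ht), List.foldl_cons]
    have hget : PySem.List.pyGetD a (t : Int) 0 = a[t] := by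
      rw [PySem.List.pyGetD_natCast]; exact List.getD_eq_getElem a 0 ht
    obtain ⟨acc', hacc'⟩ : ∃ x : Int, x = PySem.Int.bxor acc a[t] := ⟨PySem.Int.bxor acc a[t], rfl⟩
    have hpfx' : pvPfx a (t + 1) = PySem.Int.bxor (pvPfx a i) acc' := by
      rw [pvPfx_succ a t ht, hacc, hacc', pv_bxor_assoc]
      rfl
    have hiff : acc' = 0 ↔ pvPfx a i = pvPfx a (t + 1) := by
      constructor
      · intro h; rw [hpfx', h, PySem.Int.bxor_zero]
      · intro h
        rw [hpfx'] at h
        exact (pv_bxor_eq_self_iff (pvPfx a i) acc').mp h.symm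
    have hcast : ((t : Int)) + 1 = ((t + 1 : Nat) : Int) := by push_cast; ring
    obtain ⟨b', hb'⟩ : ∃ x : Int,
        x = (if acc' = 0 ∧ b < (t : Int) - (i : Int) + 1 then (t : Int) - (i : Int) + 1 else b) :=
      ⟨if acc' = 0 ∧ b < (t : Int) - (i : Int) + 1 then (t : Int) - (i : Int) + 1 else b, rfl⟩
    have hbb' : b ≤ b' := by rw [hb']; split_ifs <;> omega
    have happ : pvInnerB a i (b, acc) (t : Int) = (b', acc') := by
      unfold pvInnerB
      rw [hget, ← hacc', hb']
    rw [happ, ← PySem.List.len_eq, hcast]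
    have hc4 : best0 ≤ b' := le_trans hb0 hbb'
    have hc5 : 0 ≤ b' := le_trans hbnn hbb'
    refine ih (t + 1) b' acc' hc1 hc2 hc3 hpfx' hc4 hc5 ?_ ?_
    · intro j hij hjt heq
      rcases Nat.lt_or_ge j (t + 1) with hj | hj
      · exact le_trans (hubb j hij (by omega) heq) hbb'
      · have : j = t + 1 := by omega
        subst this
        have hz : acc' = 0 := hiff.mpr heq
        rw [hb']
        split_ifs with h
        · push_cast; omega
        · have hb2 : ¬ b < (t : Int) - (i : Int) + 1 := fun hlt => h ⟨hz, hlt⟩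
          push_cast; omega
    · clear hubb
      unfold pvAchI at hachb ⊢
      rcases hachb with hcase | ⟨j, hij, hjt, heq, hv⟩
      · rw [hb']
        split_ifs with h
        · exact Or.inr ⟨t + 1, by omega, by omega, hiff.mp h.1, by push_cast; ring⟩
        · exact Or.inl hcase
      · rw [hb']
        split_ifs with h
        · exact Or.inr ⟨t + 1, by omega, by omega, hiff.mp h.1, by push_cast; ring⟩
        · exact Or.inr ⟨j, hij, by omega, heq, hv⟩

def pvFB (a : List Int) (i : Nat) : Int :=
  (PySem.List.pyRange 0 (i : Int) 1).foldl (pvOuter a) 0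

lemma pvFB_succ (a : List Int) (i : Nat) : pvFB a (i + 1) = pvOuter a (pvFB a i) (i : Int) := by
  unfold pvFB
  rw [show ((i + 1 : Nat) : Int) = (i : Int) + 1 by push_cast; ring,
    PySem.List.pyRange_one_succ_right (Int.natCast_nonneg i), List.foldl_append]
  rfl

lemma pvB_eq_FB (a : List Int) : largest_subarray_length_alt a = pvFB a a.length := by
  unfold largest_subarray_length_alt pvFB
  rw [PySem.List.len_eq]

def pvInvB (a : List Int) (i : Nat) (b : Int) : Prop :=
  0 ≤ b ∧
  (∀ k j : Nat, k < i → k < j → j ≤ a.length → pvPfx a k = pvPfx a j → (j : Int) - (k : Int) ≤ b) ∧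
  pvAch a a.length b

lemma pvInvB_step (a : List Int) (i : Nat) (hi : i < a.length) (b : Int)
    (hinv : pvInvB a i b) : pvInvB a (i + 1) (pvOuter a b (i : Int)) := by
  obtain ⟨hnn, hub, hach⟩ := hinv
  have hspec := pvInner_spec a i b (a.length - i) i b 0 rfl le_rfl (by omega)
    (by rw [PySem.Int.bxor_zero]) le_rfl hnn
    (by intro j h1 h2 _; omega)
    (by unfold pvAchI; exact Or.inl rfl)
  obtain ⟨hle, hrnn, hrub, hrach⟩ := hspec
  have houter : pvOuter a b (i : Int) =
      ((PySem.List.pyRange (i : Int) (PySem.List.len a) 1).foldl (pvInnerB a i) (b, 0)).1 := rfl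
  rw [houter]
  refine ⟨hrnn, ?_, ?_⟩
  · intro k j hk hkj hj heq
    rcases Nat.lt_or_ge k i with hki | hki
    · exact le_trans (hub k j hki hkj hj heq) hle
    · have : k = i := by omega
      subst this
      exact hrub j hkj hj heq
  · unfold pvAchI at hrach
    rcases hrach with h | ⟨j, hij, hj, heq, hv⟩
    · rw [h]
      exact hach
    · exact Or.inr ⟨i, j, hij, hj, heq, hv⟩

lemma pvFB_inv (a : List Int) (i : Nat) (hi : i ≤ a.length) : pvInvB a i (pvFB a i) := by
  induction i with
  | zero =>
    unfold pvFB
    rw [show ((0 : Nat) : Int) = 0 by rfl, PySem.List.pyRange_one_eq_nil le_rfl]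
    exact ⟨le_rfl, by intro k j h _ _ _; omega, Or.inl rfl⟩
  | succ n ih =>
    rw [pvFB_succ]
    exact pvInvB_step a n (by omega) _ (ih (by omega))

lemma pvB_good (a : List Int) : pvGood a (largest_subarray_length_alt a) := by
  rw [pvB_eq_FB]
  obtain ⟨hnn, hub, hach⟩ := pvFB_inv a a.length le_rfl
  refine ⟨hnn, ?_, hach⟩
  intro k j hkj hj heq
  exact hub k j (by omega) hkj hj heq

-- ===== VERDICT (by name: the statement is the Claim_ definition above) =====
theorem largest_subarray_length_spec : Claim_equal_largest_subarray_length := by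
  intro array _
  unfold Spec_largest_subarray_length
  exact pvGood_unique array _ _ (pvA_good array) (pvB_good array)
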